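-- pv_equiv track=rewrite | github.com/ikazuchizero/ikazuchizero | RandomdiceCardCalc.py | highWave
-- ===== SOURCE A (Python) =====
-- def lowWave(wave):
--   list = [1,1,2,1,3] # 変更の可能性
--   card = 0
--   j = 0
--   for i in range(wave):
--     card += list[j]
--     j += 1
--     if j == 5:
--       j = 0
--   return card
--
-- def highWave(wave,border):
--   list = [2,6] # 変更の可能性
--   card = 0
--   card = lowWave(border)
--   j = 0
--   for i in range(wave - border):
--     card += list[j]
--     j += 1
--     if j == 2:
--       j = 0
--   return card
-- ===== SOURCE B (Python) =====
-- def highWave(wave, border):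
--     # Closed form: lowWave(border) = full cycles of [1,1,2,1,3] (sum 8) plus a prefix,
--     # then the [2,6] tail over wave-border waves (sum 8 per pair).
--     pre = [0, 1, 2, 4, 5]
--     n = border if border > 0 else 0
--     low = 8 * (n // 5) + pre[n % 5]
--     m = wave - border if wave > border else 0
--     return low + 8 * (m // 2) + 2 * (m % 2)
-- ===== Notes on version B (the rewrite author's own statement) =====
-- stated objective: faster
-- what changed: Replaces both per-wave accumulation loops over the cyclic card lists with a closed form: full cycles times the cycle sum (8) plus a prefix-sum lookup, with negative ranges clamped to 0.
import Mathlib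
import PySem

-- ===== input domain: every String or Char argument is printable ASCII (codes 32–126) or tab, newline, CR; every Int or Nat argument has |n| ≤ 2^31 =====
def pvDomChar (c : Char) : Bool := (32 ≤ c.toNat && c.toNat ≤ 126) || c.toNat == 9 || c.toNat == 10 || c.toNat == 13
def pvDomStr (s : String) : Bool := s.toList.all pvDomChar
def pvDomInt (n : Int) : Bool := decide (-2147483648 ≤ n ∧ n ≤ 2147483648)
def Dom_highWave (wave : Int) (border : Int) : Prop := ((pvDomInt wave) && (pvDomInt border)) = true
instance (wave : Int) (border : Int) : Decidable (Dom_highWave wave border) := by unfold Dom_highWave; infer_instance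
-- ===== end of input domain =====

-- B replaces A's per-wave loops by a closed form (full cycles × cycle sum + prefix); objective: faster (O(1) vs O(wave)).

-- ===== PORT A =====
-- loop body of lowWave's `for i in range(wave)`: card += list[j]; j += 1; if j == 5: j = 0
-- (j always stays in 0..4, so list[j] never raises; pyGetD's default is never used)
def lowStep (st : Int × Int) (_i : Int) : Int × Int :=
  let card := st.1 + PySem.List.pyGetD [1, 1, 2, 1, 3] st.2 0
  let j := st.2 + 1
  (card, if j = 5 then 0 else j)

def lowWave (wave : Int) : Int :=
  ((PySem.List.pyRange 0 wave 1).foldl lowStep (0, 0)).1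

-- loop body of highWave's `for i in range(wave - border)` over list = [2, 6]
def highStep (st : Int × Int) (_i : Int) : Int × Int :=
  let card := st.1 + PySem.List.pyGetD [2, 6] st.2 0
  let j := st.2 + 1
  (card, if j = 2 then 0 else j)

def highWave (wave : Int) (border : Int) : Int :=
  ((PySem.List.pyRange 0 (wave - border) 1).foldl highStep (lowWave border, 0)).1

-- ===== PORT B =====
def highWave_alt (wave : Int) (border : Int) : Int :=
  let pre : List Int := [0, 1, 2, 4, 5]
  let n : Int := if border > 0 then border else 0
  let low : Int := 8 * PySem.Int.floordiv n 5 + PySem.List.pyGetD pre (PySem.Int.mod n 5) 0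
  let m : Int := if wave > border then wave - border else 0
  low + 8 * PySem.Int.floordiv m 2 + 2 * PySem.Int.mod m 2

-- ===== PRECONDITION & SPEC =====
def Spec_highWave (wave : Int) (border : Int) (out : Int) : Prop := out = highWave_alt wave border
instance (wave : Int) (border : Int) (out : Int) : Decidable (Spec_highWave wave border out) := by unfold Spec_highWave; infer_instance

-- ===== CLAIM (what is proved, stated in full; the proofs are below) =====
def Claim_equal_highWave : Prop := ∀ (wave : Int) (border : Int), Dom_highWave wave border → Spec_highWave wave border (highWave wave border)

-- ===== LEMMAS AND PROOFS =====

-- prefix sums of [1,1,2,1,3]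
def preVal (r : Nat) : Int := ([0, 1, 2, 4, 5] : List Int).getD r 0

theorem pvRange_toNat (x : Int) :
    PySem.List.pyRange 0 x 1 = PySem.List.pyRange 0 ((x.toNat : Nat) : Int) 1 := by
  by_cases h : x ≤ 0
  · rw [PySem.List.pyRange_one_eq_nil h, Int.toNat_of_nonpos h]
    exact (PySem.List.pyRange_one_eq_nil (by norm_num)).symm
  · rw [Int.toNat_of_nonneg (by omega)]

theorem lowFold (n : Nat) :
    (PySem.List.pyRange 0 ((n : Nat) : Int) 1).foldl lowStep (0, 0)
      = (8 * ((n / 5 : Nat) : Int) + preVal (n % 5), ((n % 5 : Nat) : Int)) := by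
  induction n with
  | zero => decide
  | succ n ih =>
    have hc : (((n + 1 : Nat)) : Int) = ((n : Nat) : Int) + 1 := by push_cast; ring
    rw [hc, PySem.List.pyRange_one_succ_right (by exact_mod_cast Nat.zero_le n),
      List.foldl_append, ih]
    have h5 : n % 5 = 0 ∨ n % 5 = 1 ∨ n % 5 = 2 ∨ n % 5 = 3 ∨ n % 5 = 4 := by omega
    rcases h5 with h5 | h5 | h5 | h5 | h5
    · have e1 : (n + 1) % 5 = 1 := by omega
      have e2 : (n + 1) / 5 = n / 5 := by omega
      rw [h5, e1, e2]
      norm_num [lowStep, preVal, PySem.List.pyGetD_natCast, List.getD, Prod.ext_iff]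
      try omega
    · have e1 : (n + 1) % 5 = 2 := by omega
      have e2 : (n + 1) / 5 = n / 5 := by omega
      rw [h5, e1, e2]
      norm_num [lowStep, preVal, PySem.List.pyGetD_natCast, List.getD, Prod.ext_iff]
      rw [show PySem.List.pyGetD ([1, 1, 2, 1, 3] : List Int) 1 0 = 1 from by decide]
      omega
    · have e1 : (n + 1) % 5 = 3 := by omega
      have e2 : (n + 1) / 5 = n / 5 := by omega
      rw [h5, e1, e2]
      norm_num [lowStep, preVal, PySem.List.pyGetD_natCast, List.getD, Prod.ext_iff]
      rw [show PySem.List.pyGetD ([1, 1, 2, 1, 3] : List Int) 2 0 = 2 from by decide]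
      omega
    · have e1 : (n + 1) % 5 = 4 := by omega
      have e2 : (n + 1) / 5 = n / 5 := by omega
      rw [h5, e1, e2]
      norm_num [lowStep, preVal, PySem.List.pyGetD_natCast, List.getD, Prod.ext_iff]
      rw [show PySem.List.pyGetD ([1, 1, 2, 1, 3] : List Int) 3 0 = 1 from by decide]
      omega
    · have e1 : (n + 1) % 5 = 0 := by omega
      have e2 : (n + 1) / 5 = n / 5 + 1 := by omega
      rw [h5, e1, e2]
      norm_num [lowStep, preVal, PySem.List.pyGetD_natCast, List.getD, Prod.ext_iff]
      rw [show PySem.List.pyGetD ([1, 1, 2, 1, 3] : List Int) 4 0 = 3 from by decide]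
      omega

theorem highFold (n : Nat) (c : Int) :
    (PySem.List.pyRange 0 ((n : Nat) : Int) 1).foldl highStep (c, 0)
      = (c + 8 * ((n / 2 : Nat) : Int) + 2 * ((n % 2 : Nat) : Int), ((n % 2 : Nat) : Int)) := by
  induction n with
  | zero => simp [PySem.List.pyRange_one_eq_nil]
  | succ n ih =>
    have hc : (((n + 1 : Nat)) : Int) = ((n : Nat) : Int) + 1 := by push_cast; ring
    rw [hc, PySem.List.pyRange_one_succ_right (by exact_mod_cast Nat.zero_le n),
      List.foldl_append, ih]
    have h2 : n % 2 = 0 ∨ n % 2 = 1 := by omega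
    rcases h2 with h2 | h2
    · have e1 : (n + 1) % 2 = 1 := by omega
      have e2 : (n + 1) / 2 = n / 2 := by omega
      rw [h2, e1, e2]
      norm_num [highStep, PySem.List.pyGetD_natCast, List.getD, Prod.ext_iff]
      try omega
    · have e1 : (n + 1) % 2 = 0 := by omega
      have e2 : (n + 1) / 2 = n / 2 + 1 := by omega
      rw [h2, e1, e2]
      norm_num [highStep, PySem.List.pyGetD_natCast, List.getD, Prod.ext_iff]
      rw [show PySem.List.pyGetD ([2, 6] : List Int) 1 0 = 6 from by decide]
      omega

theorem lowWave_eq (b : Int) :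
    lowWave b = 8 * ((b.toNat / 5 : Nat) : Int) + preVal (b.toNat % 5) := by
  unfold lowWave
  rw [pvRange_toNat, lowFold]

theorem lowPart (b : Int) :
    8 * PySem.Int.floordiv (if b > 0 then b else 0) 5
      + PySem.List.pyGetD [0, 1, 2, 4, 5] (PySem.Int.mod (if b > 0 then b else 0) 5) 0
      = 8 * ((b.toNat / 5 : Nat) : Int) + preVal (b.toNat % 5) := by
  have hn : (if b > 0 then b else 0) = ((b.toNat : Nat) : Int) := by
    split_ifs with h <;> omega
  rw [hn, PySem.Int.floordiv_eq_ediv_of_pos (by norm_num),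
    PySem.Int.mod_eq_emod_of_pos (by norm_num)]
  have h1 : ((b.toNat : Nat) : Int) / 5 = ((b.toNat / 5 : Nat) : Int) := by omega
  have h2 : ((b.toNat : Nat) : Int) % 5 = ((b.toNat % 5 : Nat) : Int) := by omega
  rw [h1, h2, PySem.List.pyGetD_natCast]
  rfl

theorem fdPart (w b : Int) :
    PySem.Int.floordiv (if w > b then w - b else 0) 2 = (((w - b).toNat / 2 : Nat) : Int) := by
  rw [PySem.Int.floordiv_eq_ediv_of_pos (by norm_num)]
  split_ifs with h <;> omega

theorem mdPart (w b : Int) :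
    PySem.Int.mod (if w > b then w - b else 0) 2 = (((w - b).toNat % 2 : Nat) : Int) := by
  rw [PySem.Int.mod_eq_emod_of_pos (by norm_num)]
  split_ifs with h <;> omega

-- ===== VERDICT (by name: the statement is the Claim_ definition above) =====
theorem highWave_spec : Claim_equal_highWave := by
  intro wave border _
  unfold Spec_highWave
  show ((PySem.List.pyRange 0 (wave - border) 1).foldl highStep (lowWave border, 0)).1
        = highWave_alt wave border
  rw [pvRange_toNat, highFold, lowWave_eq]
  have halt : highWave_alt wave border
      = 8 * PySem.Int.floordiv (if border > 0 then border else 0) 5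
        + PySem.List.pyGetD [0, 1, 2, 4, 5] (PySem.Int.mod (if border > 0 then border else 0) 5) 0
        + 8 * PySem.Int.floordiv (if wave > border then wave - border else 0) 2
        + 2 * PySem.Int.mod (if wave > border then wave - border else 0) 2 := rfl
  rw [halt, lowPart, fdPart, mdPart]
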